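-- pv_equiv track=rewrite | github.com/CamiloJose/Intro.Progra | Semestre 2/Parciales/Primer Parcial Respuestas correctas.py | verificar_contar
-- ===== SOURCE A (Python) =====
-- def contar(num,lista,repeticiones,pos):
--     if pos==len(lista):
--         return(num,repeticiones)
--
--     elif num==lista[pos]:
--         return contar(num,lista,repeticiones+1,pos+1)
--     else:
--         return contar(num,lista,repeticiones,pos+1)
--
-- def verificar_contar(lista,listatmp,num):
--     if len(lista)==2:
--         return num
--     elif contar(lista[0],listatmp,-1,0)[1]>contar(lista[1],listatmp,-1,0)[1]:
--         return verificar_contar(lista[1:],listatmp,lista[0])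
--     elif contar(lista[0],listatmp,-1,0)[1]<contar(lista[1],listatmp,-1,0)[1]:
--         return verificar_contar(lista[1:],listatmp,lista[1])
--     else:
--         return verificar_contar(lista[1:],listatmp,-1)
-- ===== SOURCE B (Python) =====
-- def verificar_contar(lista, listatmp, num):
--     while len(lista) != 2:
--         c0 = listatmp.count(lista[0])
--         c1 = listatmp.count(lista[1])
--         if c0 > c1:
--             num = lista[0]
--         elif c0 < c1:
--             num = lista[1]
--         else:
--             num = -1
--         lista = lista[1:]
--     return num
-- ===== Notes on version B (the rewrite author's own statement) =====
-- stated objective: simpler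
-- what changed: Replaces A's two recursions (a tail-recursive pair-walker calling a hand-written recursive counter started at -1) by one flat while-loop over a shrinking slice that uses list.count for the two frequencies and updates num in place.
import Mathlib
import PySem

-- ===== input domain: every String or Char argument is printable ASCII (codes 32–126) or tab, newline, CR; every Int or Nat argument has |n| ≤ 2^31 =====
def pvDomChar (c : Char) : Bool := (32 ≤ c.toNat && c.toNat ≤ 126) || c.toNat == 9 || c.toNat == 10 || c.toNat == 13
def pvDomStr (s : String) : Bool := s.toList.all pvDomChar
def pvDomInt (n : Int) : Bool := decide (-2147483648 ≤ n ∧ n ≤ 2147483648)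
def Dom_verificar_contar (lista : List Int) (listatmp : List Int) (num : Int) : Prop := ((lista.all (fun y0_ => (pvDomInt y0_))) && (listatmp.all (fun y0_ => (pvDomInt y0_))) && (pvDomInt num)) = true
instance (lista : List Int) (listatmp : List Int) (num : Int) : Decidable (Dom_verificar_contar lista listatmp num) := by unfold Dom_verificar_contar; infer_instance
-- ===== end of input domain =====

-- B replaces A's two mutual recursions (pair-walker + hand-written counter started at -1)
-- by one flat while-loop over a shrinking slice using list.count; return values proved equal on Pre_.

-- ===== PORT A =====
-- contar(num, lista, repeticiones, pos): pos starts at 0 and only increments, so Nat is exact.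
def contar (num : Int) (lista : List Int) (repeticiones : Int) (pos : Nat) : Int × Int :=
  if pos = lista.length then (num, repeticiones)
  else if lista.length < pos then (num, repeticiones)  -- unreachable from pos = 0 (Python would have raised earlier); totality guard only
  else if num = lista.getD pos 0 then contar num lista (repeticiones + 1) (pos + 1)
  else contar num lista repeticiones (pos + 1)
termination_by lista.length - pos
decreasing_by all_goals omega

def verificar_contar (lista : List Int) (listatmp : List Int) (num : Int) : Int :=
  if lista.length = 2 then num
  else if lista.length < 2 then 0  -- Python raises IndexError here (lista[0]/lista[1]); excluded by Pre_, guard only for totality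
  else if (contar (lista.getD 0 0) listatmp (-1) 0).2 > (contar (lista.getD 1 0) listatmp (-1) 0).2 then
    verificar_contar (lista.drop 1) listatmp (lista.getD 0 0)
  else if (contar (lista.getD 0 0) listatmp (-1) 0).2 < (contar (lista.getD 1 0) listatmp (-1) 0).2 then
    verificar_contar (lista.drop 1) listatmp (lista.getD 1 0)
  else
    verificar_contar (lista.drop 1) listatmp (-1)
termination_by lista.length
decreasing_by all_goals (rw [List.length_drop]; omega)

-- ===== PORT B =====
-- the while-loop of Source B: state (lista, num), one count-compare-update-shrink step per iteration
def verificar_contar_alt (lista : List Int) (listatmp : List Int) (num : Int) : Int :=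
  if lista.length ≠ 2 then
    if lista.length < 2 then 0  -- Python raises IndexError here; excluded by Pre_, guard only for totality
    else
      let c0 := PySem.List.count listatmp (lista.getD 0 0)
      let c1 := PySem.List.count listatmp (lista.getD 1 0)
      let num' : Int := if c0 > c1 then lista.getD 0 0 else if c0 < c1 then lista.getD 1 0 else -1
      verificar_contar_alt (lista.drop 1) listatmp num'
  else num
termination_by lista.length
decreasing_by rw [List.length_drop]; omega

-- ===== PRECONDITION & SPEC =====
-- Pre_: Python A raises IndexError when len(lista) < 2 (so does B); everything else is admitted.
def Pre_verificar_contar (lista : List Int) (listatmp : List Int) (num : Int) : Prop := 2 ≤ lista.length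
instance (lista : List Int) (listatmp : List Int) (num : Int) : Decidable (Pre_verificar_contar lista listatmp num) := by unfold Pre_verificar_contar; infer_instance
def pvWitness_verificar_contar : List Int × List Int × Int := ([1, 2, 1], [1, 1, 2], 0)

def Spec_verificar_contar (lista : List Int) (listatmp : List Int) (num : Int) (out : Int) : Prop := out = verificar_contar_alt lista listatmp num
instance (lista : List Int) (listatmp : List Int) (num : Int) (out : Int) : Decidable (Spec_verificar_contar lista listatmp num out) := by unfold Spec_verificar_contar; infer_instance

-- ===== CLAIM (what is proved, stated in full; the proofs are below) =====
def Claim_equal_verificar_contar : Prop := ∀ (lista : List Int) (listatmp : List Int) (num : Int), Dom_verificar_contar lista listatmp num → Pre_verificar_contar lista listatmp num → Spec_verificar_contar lista listatmp num (verificar_contar lista listatmp num)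

-- ===== LEMMAS AND PROOFS =====

-- A's counter computes r + (#occurrences of num in the part of lista from pos on), offset by its -1 start
theorem contar_snd (num : Int) (lista : List Int) (r : Int) (pos : Nat) :
    (contar num lista r pos).2 = r + ((lista.drop pos).count num : Int) := by
  by_cases h1 : pos = lista.length
  · rw [contar]; simp [h1]
  · by_cases h2 : lista.length < pos
    · rw [contar]
      simp [h1, h2, List.drop_eq_nil_of_le (le_of_lt h2)]
    · have hlt : pos < lista.length := by omega
      have hdrop : lista.drop pos = lista.getD pos 0 :: lista.drop (pos + 1) := by
        rw [List.getD_eq_getElem _ _ hlt]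
        exact List.drop_eq_getElem_cons hlt
      rw [contar]
      simp only [h1, h2, if_false]
      by_cases he : num = lista.getD pos 0
      · rw [if_pos he, contar_snd, hdrop]
        simp [he]
        ring
      · rw [if_neg he, contar_snd, hdrop]
        simp [List.count_cons]
        exact fun hc => he hc.symm
termination_by lista.length - pos
decreasing_by all_goals omega

-- main equivalence on lists of length ≥ 2
theorem vc_eq (lista listatmp : List Int) (num : Int) (h : 2 ≤ lista.length) :
    verificar_contar lista listatmp num = verificar_contar_alt lista listatmp num := by
  by_cases h2 : lista.length = 2
  · rw [verificar_contar, verificar_contar_alt]; simp [h2]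
  · have hnl : ¬ lista.length < 2 := by omega
    rw [verificar_contar, verificar_contar_alt]
    simp only [h2, hnl, if_false, ne_eq, not_false_iff, if_true]
    rw [contar_snd, contar_snd]
    simp only [List.drop_zero, PySem.List.count_eq]
    have hd : 2 ≤ (lista.drop 1).length := by rw [List.length_drop]; omega
    set a := listatmp.count (lista.getD 0 0) with ha
    set b := listatmp.count (lista.getD 1 0) with hb
    rcases Nat.lt_trichotomy a b with hc | hc | hc
    · rw [if_neg (show ¬(-1 + (a : Int) > -1 + (b : Int)) by omega),
          if_pos (show (-1 + (a : Int) < -1 + (b : Int)) by omega),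
          if_neg (show ¬ a > b by omega), if_pos hc]
      exact vc_eq _ _ _ hd
    · rw [if_neg (show ¬(-1 + (a : Int) > -1 + (b : Int)) by omega),
          if_neg (show ¬(-1 + (a : Int) < -1 + (b : Int)) by omega),
          if_neg (show ¬ a > b by omega), if_neg (show ¬ a < b by omega)]
      exact vc_eq _ _ _ hd
    · rw [if_pos (show (-1 + (a : Int) > -1 + (b : Int)) by omega),
          if_pos (show a > b from hc)]
      exact vc_eq _ _ _ hd
termination_by lista.length
decreasing_by all_goals (rw [List.length_drop]; omega)

-- ===== VERDICT (by name: the statement is the Claim_ definition above) =====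
theorem verificar_contar_spec : Claim_equal_verificar_contar := by
  intro lista listatmp num _ hpre
  exact vc_eq lista listatmp num hpre
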